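-- pv_equiv track=rewrite | github.com/biocore/emperor | emperor/qiime_backports/filter.py | filter_mapping_file
-- ===== SOURCE A (Python) =====
-- def filter_mapping_file(map_data, map_header, good_sample_ids,
--                include_repeat_cols=False, column_rename_ids=None):
--     """Filters map according to several criteria.
--
--     - keep only sample ids in good_sample_ids
--     - drop cols that are different in every sample (except id)
--     - drop cols that are the same in every sample
--     """
--     # keeping samples
--     to_keep = []
--     to_keep.extend([i for i in map_data if i[0] in good_sample_ids])
--
--     # keeping columns
--     headers = []
--     to_keep = list(zip(*to_keep))
--     headers.append(map_header[0])
--     result = [to_keep[0]]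
--
--     if column_rename_ids:
--         # reduce in 1 as we are not using the first colum (SampleID)
--         column_rename_ids = column_rename_ids-1
--         for i,l in enumerate(to_keep[1:-1]):
--             if i==column_rename_ids:
--                 if len(set(l))!=len(result[0]):
--                      raise ValueError("The column to rename the samples is not unique.")
--                 result.append(result[0])
--                 result[0] = l
--                 headers.append('SampleID_was_' + map_header[i+1])
--             elif include_repeat_cols or len(set(l))>1:
--                 headers.append(map_header[i+1])
--                 result.append(l)
--     else:
--         for i,l in enumerate(to_keep[1:-1]):
--             if include_repeat_cols or len(set(l))>1:
--                 headers.append(map_header[i+1])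
--                 result.append(l)
--     headers.append(map_header[-1])
--     result.append(to_keep[-1])
--
--     result = list(map(list, zip(*result)))
--
--     return headers, result
-- ===== SOURCE B (Python) =====
-- def filter_mapping_file(map_data, map_header, good_sample_ids,
--                         include_repeat_cols=False, column_rename_ids=None):
--     good = set(good_sample_ids)
--     kept = [row for row in map_data if row[0] in good]
--     n = min(len(row) for row in kept)   # number of complete columns
--     # locate the rename column (if any) among the middle columns and check uniqueness
--     rename = None
--     if column_rename_ids and 1 <= column_rename_ids <= n - 2:
--         rename = column_rename_ids
--         if len(set(row[rename] for row in kept)) != len(kept):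
--             raise ValueError("The column to rename the samples is not unique.")
--     # one pass over the middle columns: output headers + projection plan of source indices
--     headers = [map_header[0]]
--     plan = [0 if rename is None else rename]
--     for j in range(1, n - 1):
--         if j == rename:
--             headers.append('SampleID_was_' + map_header[j])
--             plan.append(0)
--         elif include_repeat_cols or len(set(row[j] for row in kept)) > 1:
--             headers.append(map_header[j])
--             plan.append(j)
--     headers.append(map_header[-1])
--     plan.append(n - 1)
--     # project each kept row directly; no transpose
--     return headers, [[row[k] for k in plan] for row in kept]
-- ===== Notes on version B (the rewrite author's own statement) =====
-- stated objective: alternative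
-- what changed: B makes one planning pass that records kept headers and a projection plan of source column indices (handling the rename swap and its uniqueness check up front), then builds each output row by direct indexing, instead of A's transpose, per-column filtering with an in-loop swap, and second transpose.
import Mathlib
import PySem

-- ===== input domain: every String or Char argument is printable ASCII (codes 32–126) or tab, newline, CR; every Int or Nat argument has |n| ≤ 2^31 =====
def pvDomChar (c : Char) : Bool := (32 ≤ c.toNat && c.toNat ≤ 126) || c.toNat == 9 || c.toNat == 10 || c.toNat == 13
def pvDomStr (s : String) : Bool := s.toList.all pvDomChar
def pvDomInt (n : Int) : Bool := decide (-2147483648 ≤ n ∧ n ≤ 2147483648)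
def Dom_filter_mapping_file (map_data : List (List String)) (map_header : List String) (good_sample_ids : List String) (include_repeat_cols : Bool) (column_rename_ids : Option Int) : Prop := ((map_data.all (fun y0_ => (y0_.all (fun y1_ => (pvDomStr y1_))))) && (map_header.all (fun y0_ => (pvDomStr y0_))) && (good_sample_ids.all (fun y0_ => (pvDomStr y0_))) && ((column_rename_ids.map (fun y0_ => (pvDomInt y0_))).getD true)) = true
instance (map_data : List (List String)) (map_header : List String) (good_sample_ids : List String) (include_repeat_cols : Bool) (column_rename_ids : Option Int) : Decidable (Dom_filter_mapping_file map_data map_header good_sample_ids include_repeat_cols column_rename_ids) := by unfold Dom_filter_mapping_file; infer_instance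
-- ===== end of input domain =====

-- ===== PORT A =====
-- B changes the decomposition: one pass computing kept headers + a projection plan of source
-- column indices, rows built by direct indexing — no zip/transpose (A transposes twice).
-- zip(*rows): truncates to the shortest row; exact for every list of rows
def pvZipStar (rows : List (List String)) : List (List String) :=
  if h : rows = [] ∨ rows.any (fun r => r.isEmpty) then []
  else (rows.map (fun r => r.headD "")) :: pvZipStar (rows.map (fun r => r.tail))
termination_by (rows.headD []).length
decreasing_by
  rcases rows with _ | ⟨r, rs⟩
  · exact absurd (Or.inl rfl) h
  · rcases r with _ | ⟨a, t⟩
    · exact absurd (Or.inr (by simp)) h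
    · simp

-- the body of A's for-loop in the else-branch (no rename column given)
def pvAStep (map_header : List String) (include_repeat_cols : Bool)
    (st : List String × List (List String)) (p : Int × List String) :
    List String × List (List String) :=
  if include_repeat_cols || (PySem.Set.ofList p.2).length > 1 then
    (st.1 ++ [PySem.List.pyGetD map_header (p.1 + 1) ""], st.2 ++ [p.2])
  else st

-- the body of A's for-loop when a rename column is given; `none` models the raised ValueError
def pvAStepR (map_header : List String) (include_repeat_cols : Bool) (c' : Int)
    (st : Option (List String × List (List String))) (p : Int × List String) :
    Option (List String × List (List String)) :=
  match st with
  | none => none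
  | some (headers, result) =>
    if p.1 = c' then
      if (PySem.Set.ofList p.2).length ≠ (result.headD []).length then none
      else some (headers ++ ["SampleID_was_" ++ PySem.List.pyGetD map_header (p.1 + 1) ""],
                 p.2 :: (result.tail ++ [result.headD []]))
    else some (pvAStep map_header include_repeat_cols (headers, result) p)

def filter_mapping_file (map_data : List (List String)) (map_header : List String) (good_sample_ids : List String) (include_repeat_cols : Bool) (column_rename_ids : Option Int) : List String × List (List String) :=
  let to_keep := map_data.filter (fun i => good_sample_ids.contains (PySem.List.pyGetD i 0 ""))
  let to_keep := pvZipStar to_keep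
  let headers := [PySem.List.pyGetD map_header 0 ""]
  let result : List (List String) := [PySem.List.pyGetD to_keep 0 []]
  -- to_keep[1:-1] = (drop 1).dropLast, exact for every list
  let mids := (to_keep.drop 1).dropLast
  let st : Option (List String × List (List String)) :=
    match column_rename_ids with
    | some c =>
      if c ≠ 0 then
        (PySem.List.enumerate mids).foldl
          (pvAStepR map_header include_repeat_cols (c - 1)) (some (headers, result))
      else some ((PySem.List.enumerate mids).foldl
          (pvAStep map_header include_repeat_cols) (headers, result))
    | none => some ((PySem.List.enumerate mids).foldl
          (pvAStep map_header include_repeat_cols) (headers, result))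
  match st with
  | none => ([], [])   -- the ValueError; excluded by Pre_
  | some (headers, result) =>
    (headers ++ [PySem.List.pyGetD map_header (-1) ""],
     pvZipStar (result ++ [PySem.List.pyGetD to_keep (-1) []]))

-- ===== PORT B =====
-- the body of B's single planning loop over the middle column indices
def pvBStep (map_header : List String) (include_repeat_cols : Bool)
    (rename : Option Int) (kept : List (List String))
    (st : List String × List Int) (j : Int) : List String × List Int :=
  if rename = some j then
    (st.1 ++ ["SampleID_was_" ++ PySem.List.pyGetD map_header j ""], st.2 ++ [0])
  else if include_repeat_cols ||
      (PySem.Set.ofList (kept.map (fun row => PySem.List.pyGetD row j ""))).length > 1 then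
    (st.1 ++ [PySem.List.pyGetD map_header j ""], st.2 ++ [j])
  else st

def filter_mapping_file_alt (map_data : List (List String)) (map_header : List String) (good_sample_ids : List String) (include_repeat_cols : Bool) (column_rename_ids : Option Int) : List String × List (List String) :=
  let good := PySem.Set.ofList good_sample_ids
  let kept := map_data.filter (fun row => good.contains (PySem.List.pyGetD row 0 ""))
  let n : Int := ((kept.map (fun r => (r.length : Int))).min?).getD 0
  let rename : Option Int :=
    match column_rename_ids with
    | some c => if c ≠ 0 ∧ 1 ≤ c ∧ c ≤ n - 2 then some c else none
    | none => none
  let uniqueFail : Bool :=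
    match rename with
    | some c =>
      decide ((PySem.Set.ofList (kept.map (fun row => PySem.List.pyGetD row c ""))).length ≠ kept.length)
    | none => false
  if uniqueFail then ([], [])   -- the ValueError; excluded by Pre_
  else
    let init : List String × List Int := ([PySem.List.pyGetD map_header 0 ""], [rename.getD 0])
    let hp := (PySem.List.pyRange 1 (n - 1)).foldl (pvBStep map_header include_repeat_cols rename kept) init
    let plan := hp.2 ++ [n - 1]
    (hp.1 ++ [PySem.List.pyGetD map_header (-1) ""],
     kept.map (fun row => plan.map (fun k => PySem.List.pyGetD row k "")))

-- ===== PRECONDITION & SPEC =====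
-- helpers for stating Pre_ (they mirror no port; plain observations of the input)
def pvKept (map_data : List (List String)) (good_sample_ids : List String) : List (List String) :=
  map_data.filter (fun row => good_sample_ids.contains (row.headD ""))
def pvMinLen (rows : List (List String)) : Nat := ((rows.map List.length).min?).getD 0
def pvDistinct (rows : List (List String)) (j : Nat) : Nat :=
  (PySem.Set.ofList (rows.map (fun r => r.getD j ""))).length

-- Pre_ = exactly the inputs where A returns normally: no empty row (row[0]), nonempty header
-- (map_header[0]/[-1]), at least one kept sample (to_keep[0]), every header index a kept or
-- renamed middle column touches is in range, and a unique rename column (else ValueError).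
def Pre_filter_mapping_file (map_data : List (List String)) (map_header : List String) (good_sample_ids : List String) (include_repeat_cols : Bool) (column_rename_ids : Option Int) : Prop :=
  map_header ≠ [] ∧
  (∀ r ∈ map_data, r ≠ []) ∧
  pvKept map_data good_sample_ids ≠ [] ∧
  (∀ c ∈ column_rename_ids.toList,
     c ≠ 0 → 1 ≤ c → c ≤ (pvMinLen (pvKept map_data good_sample_ids) : Int) - 2 →
       pvDistinct (pvKept map_data good_sample_ids) c.toNat = (pvKept map_data good_sample_ids).length) ∧
  (∀ j ∈ List.range' 1 (pvMinLen (pvKept map_data good_sample_ids) - 2),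
     (column_rename_ids = some (j : Int) ∨ include_repeat_cols = true ∨
       1 < pvDistinct (pvKept map_data good_sample_ids) j) → j < map_header.length)
instance (map_data : List (List String)) (map_header : List String) (good_sample_ids : List String) (include_repeat_cols : Bool) (column_rename_ids : Option Int) : Decidable (Pre_filter_mapping_file map_data map_header good_sample_ids include_repeat_cols column_rename_ids) := by unfold Pre_filter_mapping_file; infer_instance

def pvWitness_filter_mapping_file : List (List String) × List String × List String × Bool × Option Int :=
  ([["s1", "x", "a", "e1"], ["s2", "y", "a", "e2"], ["s9", "z", "b", "e3"]],
   ["SampleID", "Treatment", "Const", "Description"], ["s1", "s2"], false, some 1)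

def Spec_filter_mapping_file (map_data : List (List String)) (map_header : List String) (good_sample_ids : List String) (include_repeat_cols : Bool) (column_rename_ids : Option Int) (out : List String × List (List String)) : Prop := out = filter_mapping_file_alt map_data map_header good_sample_ids include_repeat_cols column_rename_ids
instance (map_data : List (List String)) (map_header : List String) (good_sample_ids : List String) (include_repeat_cols : Bool) (column_rename_ids : Option Int) (out : List String × List (List String)) : Decidable (Spec_filter_mapping_file map_data map_header good_sample_ids include_repeat_cols column_rename_ids out) := by unfold Spec_filter_mapping_file; infer_instance

-- ===== CLAIM (what is proved, stated in full; the proofs are below) =====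
def Claim_equal_filter_mapping_file : Prop := ∀ (map_data : List (List String)) (map_header : List String) (good_sample_ids : List String) (include_repeat_cols : Bool) (column_rename_ids : Option Int), Dom_filter_mapping_file map_data map_header good_sample_ids include_repeat_cols column_rename_ids → Pre_filter_mapping_file map_data map_header good_sample_ids include_repeat_cols column_rename_ids → Spec_filter_mapping_file map_data map_header good_sample_ids include_repeat_cols column_rename_ids (filter_mapping_file map_data map_header good_sample_ids include_repeat_cols column_rename_ids)

-- ===== LEMMAS AND PROOFS =====
-- column j of the kept rows, Nat- and Int-indexed
def pvColD (rows : List (List String)) (j : Nat) : List String := rows.map (fun r => r.getD j "")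
def pvColI (rows : List (List String)) (k : Int) : List String :=
  rows.map (fun r => PySem.List.pyGetD r k "")

theorem pv_pyGetD_zero {α : Type} (r : List α) (d : α) :
    PySem.List.pyGetD r 0 d = r.headD d := by
  cases r <;> simp [PySem.List.pyGetD, PySem.List.pyGet?, PySem.List.pyIdx?]

theorem pv_colI_natCast (rows : List (List String)) (j : Nat) :
    pvColI rows (j : Int) = pvColD rows j := by
  simp [pvColI, pvColD, PySem.List.pyGetD_natCast]

theorem pv_contains_ofList (gs : List String) (x : String) :
    (PySem.Set.ofList gs).contains x = gs.contains x := by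
  have h := PySem.Set.mem_ofList gs x
  by_cases hx : x ∈ gs
  · simp [hx, h.mpr hx]
  · simp [hx, h]

theorem pv_min_pair (rows : List (List String)) (h : rows ≠ []) :
    ∃ k : Nat, ((rows.map List.length).min?) = some k ∧
      ((rows.map (fun r => (r.length : Int))).min?) = some (k : Int) := by
  induction rows with
  | nil => simp at h
  | cons r rs ih =>
    rcases rs with _ | ⟨r2, rs⟩
    · exact ⟨r.length, by simp, by simp⟩
    · obtain ⟨k, h1, h2⟩ := ih (by simp)
      refine ⟨min r.length k, ?_, ?_⟩
      · rw [List.map_cons, List.min?_cons, h1]; simp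
      · rw [List.map_cons, List.min?_cons, h2]; simp [Nat.cast_min]

theorem pv_minLen_int (rows : List (List String)) (h : rows ≠ []) :
    ((rows.map (fun r => (r.length : Int))).min?).getD 0 = (pvMinLen rows : Int) := by
  obtain ⟨k, h1, h2⟩ := pv_min_pair rows h
  simp [pvMinLen, h1, h2]

theorem pv_minLen_cons (r : List String) (rs : List (List String)) (h : rs ≠ []) :
    pvMinLen (r :: rs) = min r.length (pvMinLen rs) := by
  obtain ⟨k, h1, _⟩ := pv_min_pair rs h
  simp [pvMinLen, List.min?_cons, h1]

theorem pv_minLen_le (rows : List (List String)) (r : List String) (hr : r ∈ rows) :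
    pvMinLen rows ≤ r.length := by
  induction rows with
  | nil => simp at hr
  | cons x rs ih =>
    rcases rs with _ | ⟨r2, rs⟩
    · simp at hr; simp [pvMinLen, hr]
    · rw [pv_minLen_cons _ _ (by simp)]
      rcases List.mem_cons.mp hr with h | h
      · subst h; omega
      · have := ih h; omega

theorem pv_minLen_zero (rows : List (List String)) (h : rows.any (fun r => r.isEmpty) = true) :
    pvMinLen rows = 0 := by
  rcases List.any_eq_true.mp h with ⟨r, hr, he⟩
  have h1 := pv_minLen_le rows r hr
  have h2 : r.length = 0 := by simpa [List.isEmpty_iff_length_eq_zero] using he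
  omega

theorem pv_minLen_pos (rows : List (List String)) (h : rows ≠ [])
    (hne : rows.any (fun r => r.isEmpty) = false) : 1 ≤ pvMinLen rows := by
  induction rows with
  | nil => simp at h
  | cons r rs ih =>
    have hr : r ≠ [] := by intro hh; apply absurd hne; simp [hh]
    have hr1 : 1 ≤ r.length := List.length_pos_iff.mpr hr
    rcases rs with _ | ⟨r2, rs⟩
    · simp [pvMinLen]; omega
    · have hne' : (r2 :: rs).any (fun r => r.isEmpty) = false := by
        simp at hne ⊢; exact hne.2
      have := ih (by simp) hne'
      rw [pv_minLen_cons _ _ (by simp)]; omega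

theorem pv_minLen_tail (rows : List (List String)) (h : rows ≠ [])
    (hne : rows.any (fun r => r.isEmpty) = false) :
    pvMinLen (rows.map (fun r => r.tail)) = pvMinLen rows - 1 := by
  induction rows with
  | nil => simp at h
  | cons r rs ih =>
    have hr : r ≠ [] := by intro hh; apply absurd hne; simp [hh]
    have hr1 : 1 ≤ r.length := List.length_pos_iff.mpr hr
    have hrt : r.tail.length = r.length - 1 := by simp [List.length_tail]
    rcases rs with _ | ⟨r2, rs⟩
    · simp [pvMinLen, hrt]
    · have hne' : (r2 :: rs).any (fun r => r.isEmpty) = false := by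
        simp at hne ⊢; exact hne.2
      have iht := ih (by simp) hne'
      have hpos := pv_minLen_pos (r2 :: rs) (by simp) hne'
      rw [List.map_cons, pv_minLen_cons _ _ (by simp), pv_minLen_cons _ _ (by simp), iht, hrt]
      omega

theorem pv_minLen_const (cols : List (List String)) (K : Nat) (h : cols ≠ [])
    (hlen : ∀ c ∈ cols, c.length = K) : pvMinLen cols = K := by
  induction cols with
  | nil => simp at h
  | cons c cs ih =>
    rcases cs with _ | ⟨c2, cs⟩
    · simp [pvMinLen, hlen c (by simp)]
    · rw [pv_minLen_cons _ _ (by simp), hlen c (by simp),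
        ih (by simp) (fun x hx => hlen x (by simp [List.mem_cons.mp hx]))]
      omega

theorem pv_zipStar_eq : ∀ (rows : List (List String)),
    pvZipStar rows = (List.range (pvMinLen rows)).map (pvColD rows) := by
  intro rows
  induction hn : (rows.headD []).length using Nat.strong_induction_on generalizing rows with
  | _ n ih =>
  rw [pvZipStar]
  split_ifs with hc
  · rcases hc with h | h
    · simp [h, pvMinLen]
    · simp [pv_minLen_zero rows h]
  · rw [not_or] at hc
    obtain ⟨h1, h2⟩ := hc
    have h2' : rows.any (fun r => r.isEmpty) = false := by
      simp only [List.any_eq_false]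
      intro r hr he
      exact h2 (List.any_eq_true.mpr ⟨r, hr, he⟩)
    have hm := pv_minLen_pos rows h1 h2'
    have ht := pv_minLen_tail rows h1 h2'
    have hlt : ((rows.map (fun r => r.tail)).headD []).length < n := by
      subst hn
      rcases rows with _ | ⟨r, rs⟩
      · exact absurd rfl h1
      · rcases r with _ | ⟨a, t⟩
        · exact absurd (by simp : (([] : List String) :: rs).any (fun r => r.isEmpty) = true)
            (by simp [h2'])
        · simp
    rw [ih _ hlt _ rfl, ht]
    obtain ⟨t, hmt⟩ : ∃ t, pvMinLen rows = t + 1 := ⟨pvMinLen rows - 1, by omega⟩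
    rw [hmt]
    simp only [Nat.add_sub_cancel, List.range_succ_eq_map]
    rw [List.map_cons]
    congr 1
    · simp only [pvColD]
      exact List.map_congr_left (fun r _ => by cases r <;> simp)
    · rw [List.map_map]
      exact List.map_congr_left (fun j _ => by
        simp only [pvColD, Function.comp_apply, List.map_map]
        exact List.map_congr_left (fun r _ => by cases r <;> simp))

theorem pv_fin (kept : List (List String)) (plan : List Int) (hp : plan ≠ []) :
    pvZipStar (plan.map (pvColI kept)) =
      kept.map (fun row => plan.map (fun k => PySem.List.pyGetD row k "")) := by
  rw [pv_zipStar_eq]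
  have hK : pvMinLen (plan.map (pvColI kept)) = kept.length := by
    apply pv_minLen_const _ _ (by simpa using hp)
    intro c hc
    rcases List.mem_map.mp hc with ⟨k, _, rfl⟩
    simp [pvColI]
  rw [hK]
  apply List.ext_getElem (by simp)
  intro i h1 h2
  simp only [List.getElem_map, List.getElem_range]
  simp only [pvColD, List.map_map]
  apply List.map_congr_left
  intro k _
  simp only [Function.comp_apply, pvColI]
  rw [List.getD_eq_getElem _ _ (by simpa using h2), List.getElem_map]

theorem pv_range'_drop_dropLast (m : Nat) :
    (((List.range m).drop 1).dropLast) = List.range' 1 (m - 2) := by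
  match m with
  | 0 => simp
  | 1 => simp
  | (t+2) =>
    rw [List.range_eq_range', List.range'_succ, List.drop_succ_cons, List.drop_zero]
    rw [List.range'_concat]
    simp

theorem pv_pyRange_eq (m : Nat) :
    PySem.List.pyRange 1 ((m : Int) - 1) =
      (List.range' 1 (m - 2)).map (fun (j : Nat) => (j : Int)) := by
  simp only [List.range'_eq_map_range, List.map_map, PySem.List.pyRange]
  norm_num
  by_cases h : (1 : Int) < (m : Int) - 1
  · rw [if_pos h]
    have h2 : m - 1 - 1 = m - 2 := by omega
    rw [h2]
    exact List.map_congr_left (fun k _ => by simp only [Function.comp_apply]; push_cast; ring)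
  · rw [if_neg h]
    have : m - 2 = 0 := by omega
    simp [this]

theorem pv_enumerate_cons {α : Type} (x : α) (l : List α) (s : Int) :
    PySem.List.enumerate (x :: l) s = (s, x) :: PySem.List.enumerate l (s + 1) := by
  simp [PySem.List.enumerate]

theorem pv_enum_append {α : Type} (l1 l2 : List α) (s : Int) :
    PySem.List.enumerate (l1 ++ l2) s =
      PySem.List.enumerate l1 s ++ PySem.List.enumerate l2 (s + l1.length) := by
  induction l1 generalizing s with
  | nil => simp [PySem.List.enumerate]
  | cons x l ih =>
    rw [List.cons_append, pv_enumerate_cons, pv_enumerate_cons, ih (s + 1), List.cons_append]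
    have harg : s + 1 + (l.length : Int) = s + ((x :: l).length : Int) := by
      push_cast [List.length_cons]; ring
    rw [harg]

theorem pv_enum_mem {α : Type} (l : List α) (s : Int) :
    ∀ p ∈ PySem.List.enumerate l s, s ≤ p.1 ∧ p.1 < s + l.length := by
  induction l generalizing s with
  | nil => simp [PySem.List.enumerate]
  | cons x l ih =>
    intro p hp
    rw [pv_enumerate_cons] at hp
    rcases List.mem_cons.mp hp with h | h
    · subst h; simp
    · have := ih (s + 1) p h
      simp [List.length_cons]
      push_cast
      omega

theorem pv_aStep_split (mh : List String) (irc : Bool)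
    (st : List String × List (List String)) (p : Int × List String) :
    pvAStep mh irc st p =
      (st.1 ++ (pvAStep mh irc ([], []) p).1, st.2 ++ (pvAStep mh irc ([], []) p).2) := by
  unfold pvAStep; split_ifs <;> simp

theorem pv_bStep_split (mh : List String) (irc : Bool) (ren : Option Int)
    (kept : List (List String)) (st : List String × List Int) (j : Int) :
    pvBStep mh irc ren kept st j =
      (st.1 ++ (pvBStep mh irc ren kept ([], []) j).1,
       st.2 ++ (pvBStep mh irc ren kept ([], []) j).2) := by
  unfold pvBStep; split_ifs <;> simp

theorem pv_foldl_biacc {γ δ : Type} (step : List String × List γ → δ → List String × List γ)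
    (hsplit : ∀ st x, step st x = (st.1 ++ (step ([], []) x).1, st.2 ++ (step ([], []) x).2)) :
    ∀ (L : List δ) (st : List String × List γ),
      L.foldl step st = (st.1 ++ (L.foldl step ([], [])).1, st.2 ++ (L.foldl step ([], [])).2) := by
  intro L
  induction L with
  | nil => intro st; simp
  | cons x L ih =>
    intro st
    simp only [List.foldl_cons]
    rw [ih (step st x), ih (step ([], []) x), hsplit st x]
    simp

theorem pv_aFold_noRen (mh : List String) (irc : Bool) (c' : Int)
    (L : List (Int × List String)) (hL : ∀ p ∈ L, p.1 ≠ c') :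
    ∀ st, L.foldl (pvAStepR mh irc c') (some st) = some (L.foldl (pvAStep mh irc) st) := by
  induction L with
  | nil => intro st; simp
  | cons p L ih =>
    intro st
    have hp := hL p (by simp)
    simp only [List.foldl_cons]
    rw [← ih (fun q hq => hL q (by simp [hq]))]
    obtain ⟨h, r⟩ := st
    simp [pvAStepR, hp]

theorem pv_delta_eq (mh : List String) (irc : Bool) (ren : Option Int)
    (kept : List (List String)) :
    ∀ (t j0 : Nat), 1 ≤ j0 → (∀ j ∈ List.range' j0 t, ren ≠ some (j : Int)) →
      ((PySem.List.enumerate ((List.range' j0 t).map (pvColD kept)) ((j0 : Int) - 1)).foldl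
          (pvAStep mh irc) ([], [])) =
        Prod.map id (List.map (pvColI kept))
          ((((List.range' j0 t).map (fun (j : Nat) => (j : Int))).foldl
            (pvBStep mh irc ren kept) ([], []))) := by
  intro t
  induction t with
  | zero => intro j0 _ _; simp [PySem.List.enumerate]
  | succ t ih =>
    intro j0 hj0 hren
    rw [List.range'_succ]
    simp only [List.map_cons, List.foldl_cons]
    rw [pv_enumerate_cons, List.foldl_cons]
    rw [pv_foldl_biacc _ (pv_aStep_split mh irc) _ (pvAStep mh irc ([],[]) _)]
    rw [pv_foldl_biacc _ (pv_bStep_split mh irc ren kept) _ (pvBStep mh irc ren kept ([],[]) _)]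
    have hstart : ((j0 : Int) - 1) + 1 = ((j0 + 1 : Nat) : Int) - 1 := by push_cast; ring
    rw [hstart]
    rw [ih (j0 + 1) (by omega)
      (fun j hj => hren j (by rw [List.range'_succ]; exact List.mem_cons_of_mem _ hj))]
    have hstep : pvAStep mh irc ([], []) (((j0 : Int) - 1), pvColD kept j0) =
        Prod.map id (List.map (pvColI kept)) (pvBStep mh irc ren kept ([], []) (j0 : Int)) := by
      have hr : ren ≠ some (j0 : Int) :=
        hren j0 (by rw [List.range'_succ]; exact List.mem_cons_self ..)
      unfold pvAStep pvBStep
      rw [if_neg hr]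
      have hc : kept.map (fun row => PySem.List.pyGetD row (j0 : Int) "") = pvColD kept j0 := by
        rw [← pv_colI_natCast]; rfl
      rw [hc]
      have he : (j0 : Int) - 1 + 1 = (j0 : Int) := by ring
      simp only [he]
      split_ifs <;> simp [pv_colI_natCast]
    rw [hstep]
    rcases (pvBStep mh irc ren kept ([],[]) (j0:Int)) with ⟨dh, dp⟩
    rcases ((((List.range' (j0+1) t).map (fun (j : Nat) => (j : Int))).foldl
      (pvBStep mh irc ren kept) ([], []))) with ⟨eh, ep⟩
    simp


-- the whole no-rename computation, A-shape = B-shape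
theorem pv_core_plain (mh : List String) (irc : Bool) (kept : List (List String)) (m : Nat)
    (hm : 1 ≤ m) :
    (((PySem.List.enumerate ((List.range' 1 (m-2)).map (pvColD kept)) 0).foldl
        (pvAStep mh irc) ([PySem.List.pyGetD mh 0 ""], [pvColD kept 0])).1
        ++ [PySem.List.pyGetD mh (-1) ""],
     pvZipStar (((PySem.List.enumerate ((List.range' 1 (m-2)).map (pvColD kept)) 0).foldl
        (pvAStep mh irc) ([PySem.List.pyGetD mh 0 ""], [pvColD kept 0])).2
        ++ [pvColD kept (m-1)]))
    =
    ((((List.range' 1 (m-2)).map (fun (j : Nat) => (j : Int))).foldl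
        (pvBStep mh irc none kept) ([PySem.List.pyGetD mh 0 ""], [0])).1
        ++ [PySem.List.pyGetD mh (-1) ""],
     kept.map (fun row =>
       (((((List.range' 1 (m-2)).map (fun (j : Nat) => (j : Int))).foldl
           (pvBStep mh irc none kept) ([PySem.List.pyGetD mh 0 ""], [0])).2
         ++ [(m : Int) - 1])).map (fun k => PySem.List.pyGetD row k ""))) := by
  have hδ := pv_delta_eq mh irc none kept (m-2) 1 le_rfl (by intro j _ hcon; simp at hcon)
  have h10 : ((1 : Nat) : Int) - 1 = 0 := by norm_num
  rw [h10] at hδ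
  rcases hB : (((List.range' 1 (m-2)).map (fun (j : Nat) => (j : Int))).foldl
      (pvBStep mh irc none kept) ([], [])) with ⟨dh, dp⟩
  rw [hB] at hδ
  rw [pv_foldl_biacc _ (pv_aStep_split mh irc), hδ,
    pv_foldl_biacc _ (pv_bStep_split mh irc none kept), hB]
  have hc0 : pvColI kept 0 = pvColD kept 0 := by
    have := pv_colI_natCast kept 0; simpa using this
  have hcm : pvColI kept ((m : Int) - 1) = pvColD kept (m-1) := by
    have h1 : ((m - 1 : Nat) : Int) = (m : Int) - 1 := by omega
    rw [← h1, pv_colI_natCast]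
  apply Prod.ext
  · simp
  · show pvZipStar (([pvColD kept 0] ++ dp.map (pvColI kept)) ++ [pvColD kept (m-1)]) = _
    have hplan : ([pvColD kept 0] ++ dp.map (pvColI kept)) ++ [pvColD kept (m-1)]
        = ((([0] ++ dp) ++ [(m : Int) - 1]).map (pvColI kept)) := by
      simp [hc0, hcm]
    rw [hplan, pv_fin _ _ (by simp)]


theorem pv_core_ren (mh : List String) (irc : Bool) (kept : List (List String)) (m c'' : Nat)
    (hc1 : 1 ≤ c'') (hc2 : c'' ≤ m - 2)
    (huniq : (PySem.Set.ofList (pvColD kept c'')).length = kept.length) :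
    ((PySem.List.enumerate ((List.range' 1 (m-2)).map (pvColD kept)) 0).foldl
        (pvAStepR mh irc ((c'' : Int) - 1)) (some ([PySem.List.pyGetD mh 0 ""], [pvColD kept 0])))
    = some (Prod.map id (List.map (pvColI kept))
        ((((List.range' 1 (m-2)).map (fun (j : Nat) => (j : Int))).foldl
          (pvBStep mh irc (some (c'' : Int)) kept)
          ([PySem.List.pyGetD mh 0 ""], [(c'' : Int)])))) := by
  have hc0 : pvColI kept 0 = pvColD kept 0 := by
    have := pv_colI_natCast kept 0; simpa using this
  have hcc : pvColI kept ((c'' : Nat) : Int) = pvColD kept c'' := pv_colI_natCast kept c''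
  -- split the index range around the rename column
  have hsplit : List.range' 1 (m-2) =
      (List.range' 1 (c''-1) ++ [c'']) ++ List.range' (c''+1) (m-2-c'') := by
    have e2 : m - 2 = (c''-1) + (1 + (m-2-c'')) := by omega
    rw [e2, ← List.range'_append (s := 1) (m := c''-1) (n := 1 + (m-2-c'')) (step := 1)]
    have e1 : 1 + 1 * (c''-1) = c'' := by omega
    rw [e1, Nat.add_comm 1 (m-2-c''), List.range'_succ]
    have e3 : c'' - 1 + (m - 2 - c'' + 1) - c'' = m - 2 - c'' := by omega
    simp [e3]
  rw [hsplit]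
  simp only [List.map_append, pv_enum_append, List.foldl_append, List.map_cons,
    List.map_nil, List.length_append, List.length_map, List.length_range',
    List.length_cons, List.length_nil]
  -- segment 1 (before the rename column)
  have hmem1 : ∀ p ∈ PySem.List.enumerate ((List.range' 1 (c''-1)).map (pvColD kept)) 0,
      p.1 ≠ (c'' : Int) - 1 := by
    intro p hp
    have := pv_enum_mem _ 0 p hp
    simp at this
    omega
  rw [pv_aFold_noRen mh irc _ _ hmem1]
  have hδ1 := pv_delta_eq mh irc (some (c'' : Int)) kept (c''-1) 1 le_rfl
    (by
      intro j hj hcon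
      have := List.mem_range'.mp hj
      have hji := Option.some.inj hcon
      have hj2 : c'' = j := by exact_mod_cast hji
      omega)
  have h10 : ((1 : Nat) : Int) - 1 = 0 := by norm_num
  rw [h10] at hδ1
  rcases hB1 : (((List.range' 1 (c''-1)).map (fun (j : Nat) => (j : Int))).foldl
      (pvBStep mh irc (some (c'' : Int)) kept) ([], [])) with ⟨dh1, dp1⟩
  rw [hB1] at hδ1
  rw [pv_foldl_biacc _ (pv_aStep_split mh irc), hδ1]
  rw [pv_foldl_biacc _ (pv_bStep_split mh irc (some (c'' : Int)) kept)
    (((List.range' 1 (c''-1)).map (fun (j : Nat) => (j : Int)))), hB1]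
  -- the rename step itself
  have hstart : (0 : Int) + ((c''-1 : Nat) : Int) = (c'' : Int) - 1 := by omega
  rw [pv_enumerate_cons]
  simp only [List.foldl_cons, List.foldl_nil]
  rw [show PySem.List.enumerate ([] : List (List String)) ((0 + ((c''-1 : Nat) : Int)) + 1) = [] from rfl]
  simp only [List.foldl_nil]
  have hmid : pvAStepR mh irc ((c'' : Int) - 1)
      (some (([PySem.List.pyGetD mh 0 ""], [pvColD kept 0]).1 ++ (Prod.map id (List.map (pvColI kept)) (dh1, dp1)).1,
             ([PySem.List.pyGetD mh 0 ""], [pvColD kept 0]).2 ++ (Prod.map id (List.map (pvColI kept)) (dh1, dp1)).2))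
      ((0 + ((c''-1 : Nat) : Int)), pvColD kept c'') =
      some (([PySem.List.pyGetD mh 0 ""] ++ dh1) ++ ["SampleID_was_" ++ PySem.List.pyGetD mh (c'' : Int) ""],
            pvColD kept c'' :: (dp1.map (pvColI kept) ++ [pvColD kept 0])) := by
    unfold pvAStepR
    simp only [Prod.map, id]
    rw [if_pos hstart]
    have hhead : (([PySem.List.pyGetD mh 0 ""], [pvColD kept 0]).2 ++ (dp1.map (pvColI kept))).headD [] = pvColD kept 0 := by simp
    have hlen : (pvColD kept 0).length = kept.length := by simp [pvColD]
    rw [if_neg (by simp only [hhead, hlen]; omega)]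
    have harg : (0 + ((c''-1 : Nat) : Int)) + 1 = (c'' : Int) := by omega
    rw [harg]
    simp only [List.singleton_append, List.tail_cons, List.headD_cons]
  rw [hmid]
  have hmidB : pvBStep mh irc (some (c'' : Int)) kept
      (([PySem.List.pyGetD mh 0 ""], [(c'' : Int)]).1 ++ (dh1, dp1).1,
       ([PySem.List.pyGetD mh 0 ""], [(c'' : Int)]).2 ++ (dh1, dp1).2) ((c'' : Nat) : Int) =
      (([PySem.List.pyGetD mh 0 ""] ++ dh1) ++ ["SampleID_was_" ++ PySem.List.pyGetD mh (c'' : Int) ""],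
       (((c'' : Int) :: dp1) ++ [0])) := by
    unfold pvBStep
    rw [if_pos rfl]
    simp
  rw [hmidB]
  -- segment 3 (after the rename column)
  have hmem3 : ∀ p ∈ PySem.List.enumerate
      ((List.range' (c''+1) (m-2-c'')).map (pvColD kept)) (0 + ((c''-1+(0+1) : Nat) : Int)),
      p.1 ≠ (c'' : Int) - 1 := by
    intro p hp
    have := pv_enum_mem _ _ p hp
    omega
  rw [pv_aFold_noRen mh irc _ _ hmem3]
  have hδ3 := pv_delta_eq mh irc (some (c'' : Int)) kept (m-2-c'') (c''+1) (by omega)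
    (by
      intro j hj hcon
      have := List.mem_range'.mp hj
      have hji := Option.some.inj hcon
      have hj2 : c'' = j := by exact_mod_cast hji
      omega)
  have hstart3 : (0 : Int) + ((c''-1+(0+1) : Nat) : Int) = ((c''+1 : Nat) : Int) - 1 := by omega
  rw [hstart3]
  rcases hB3 : (((List.range' (c''+1) (m-2-c'')).map (fun (j : Nat) => (j : Int))).foldl
      (pvBStep mh irc (some (c'' : Int)) kept) ([], [])) with ⟨dh3, dp3⟩
  rw [hB3] at hδ3
  rw [pv_foldl_biacc _ (pv_aStep_split mh irc), hδ3]
  rw [pv_foldl_biacc _ (pv_bStep_split mh irc (some (c'' : Int)) kept)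
    (((List.range' (c''+1) (m-2-c'')).map (fun (j : Nat) => (j : Int)))), hB3]
  simp [hc0, hcc]


theorem pv_pyGetD_neg_one {α : Type} (l : List α) (d : α) (h : l ≠ []) :
    PySem.List.pyGetD l (-1) d = l.getD (l.length - 1) d := by
  cases l with
  | nil => simp at h
  | cons a t => simp [PySem.List.pyGetD, PySem.List.pyGet?, PySem.List.pyIdx?]

theorem pv_finish (mh : List String) (kept : List (List String)) (m : Nat) (hm : 1 ≤ m)
    (hp : List String × List Int) :
    ((Prod.map id (List.map (pvColI kept)) hp).1 ++ [PySem.List.pyGetD mh (-1) ""],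
     pvZipStar ((Prod.map id (List.map (pvColI kept)) hp).2 ++ [pvColD kept (m-1)]))
    = (hp.1 ++ [PySem.List.pyGetD mh (-1) ""],
       kept.map (fun row => (hp.2 ++ [(m : Int) - 1]).map (fun k => PySem.List.pyGetD row k ""))) := by
  rcases hp with ⟨hh, pp⟩
  have hcm : pvColI kept ((m : Int) - 1) = pvColD kept (m-1) := by
    have h1 : ((m - 1 : Nat) : Int) = (m : Int) - 1 := by omega
    rw [← h1, pv_colI_natCast]
  apply Prod.ext
  · rfl
  · show pvZipStar (pp.map (pvColI kept) ++ [pvColD kept (m-1)]) = _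
    have hl : pp.map (pvColI kept) ++ [pvColD kept (m-1)]
        = (pp ++ [(m : Int) - 1]).map (pvColI kept) := by simp [hcm]
    rw [hl, pv_fin _ _ (by simp)]

-- ===== VERDICT (by name: the statement is the Claim_ definition above) =====
theorem filter_mapping_file_spec : Claim_equal_filter_mapping_file := by
  unfold Claim_equal_filter_mapping_file
  intro md mh gs irc cri _hD hP
  obtain ⟨hmh, hrows, hkne, huniqP, _hhdr⟩ := hP
  unfold Spec_filter_mapping_file
  have hfA : md.filter (fun i => gs.contains (PySem.List.pyGetD i 0 "")) = pvKept md gs := by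
    unfold pvKept
    exact List.filter_congr (fun r _ => by rw [pv_pyGetD_zero])
  have hfB : md.filter (fun row => (PySem.Set.ofList gs).contains (PySem.List.pyGetD row 0 ""))
      = pvKept md gs := by
    unfold pvKept
    exact List.filter_congr (fun r _ => by rw [pv_contains_ofList, pv_pyGetD_zero])
  have hne : ∀ r ∈ pvKept md gs, r ≠ [] := fun r hr => hrows r (List.mem_of_mem_filter hr)
  have hany : (pvKept md gs).any (fun r => r.isEmpty) = false := by
    simp only [List.any_eq_false]
    intro r hr he
    exact hne r hr (by simpa [List.isEmpty_iff] using he)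
  have hm1 : 1 ≤ pvMinLen (pvKept md gs) := pv_minLen_pos _ hkne hany
  have hnm : ((((pvKept md gs)).map (fun r => (r.length : Int))).min?).getD 0
      = (pvMinLen (pvKept md gs) : Int) := pv_minLen_int _ hkne
  have htk0 : PySem.List.pyGetD ((List.range (pvMinLen (pvKept md gs))).map (pvColD (pvKept md gs))) 0 []
      = pvColD (pvKept md gs) 0 := by
    obtain ⟨t, ht⟩ : ∃ t, pvMinLen (pvKept md gs) = t + 1 := ⟨pvMinLen (pvKept md gs) - 1, by omega⟩
    rw [pv_pyGetD_zero, ht, List.range_succ_eq_map]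
    simp
  have htkl : PySem.List.pyGetD ((List.range (pvMinLen (pvKept md gs))).map (pvColD (pvKept md gs))) (-1) []
      = pvColD (pvKept md gs) (pvMinLen (pvKept md gs) - 1) := by
    rw [pv_pyGetD_neg_one _ _ (by simp; omega)]
    rw [List.getD_eq_getElem _ _ (by simp; omega)]
    simp
  have hmids : ((((List.range (pvMinLen (pvKept md gs))).map (pvColD (pvKept md gs))).drop 1).dropLast)
      = (List.range' 1 (pvMinLen (pvKept md gs) - 2)).map (pvColD (pvKept md gs)) := by
    rw [← List.map_drop, ← List.map_dropLast, pv_range'_drop_dropLast]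
  rcases cri with _ | c
  · -- column_rename_ids = None
    simp only [filter_mapping_file, filter_mapping_file_alt, hfA, hfB, hnm,
      pv_zipStar_eq (pvKept md gs), htk0, htkl, hmids, pv_pyRange_eq, Option.getD_none]
    simp only [Bool.false_eq_true, if_false]
    exact pv_core_plain mh irc (pvKept md gs) (pvMinLen (pvKept md gs)) hm1
  · by_cases hc0 : c = 0
    · subst hc0
      simp only [filter_mapping_file, filter_mapping_file_alt, hfA, hfB, hnm,
        pv_zipStar_eq (pvKept md gs), htk0, htkl, hmids, pv_pyRange_eq]
      rw [if_neg (show ¬ ((0 : Int) ≠ 0) from by norm_num),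
        if_neg (show ¬ ((0 : Int) ≠ 0 ∧ 1 ≤ (0 : Int) ∧
          (0 : Int) ≤ (pvMinLen (pvKept md gs) : Int) - 2) from fun hcon => hcon.1 rfl)]
      simp only [Bool.false_eq_true, if_false, Option.getD_none]
      exact pv_core_plain mh irc (pvKept md gs) (pvMinLen (pvKept md gs)) hm1
    · by_cases hcr : 1 ≤ c ∧ c ≤ (pvMinLen (pvKept md gs) : Int) - 2
      · -- the rename column is in range
        have hcc : ((c.toNat : Nat) : Int) = c := Int.toNat_of_nonneg (by omega)
        have hb1 : 1 ≤ c.toNat := by omega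
        have hb2 : c.toNat ≤ pvMinLen (pvKept md gs) - 2 := by omega
        have hcol := pv_colI_natCast (pvKept md gs) c.toNat
        unfold pvColI at hcol
        have huq : (PySem.Set.ofList (pvColD (pvKept md gs) c.toNat)).length
            = (pvKept md gs).length := by
          have hh := huniqP c (by simp) hc0 hcr.1 hcr.2
          exact hh
        simp only [filter_mapping_file, filter_mapping_file_alt, hfA, hfB, hnm,
          pv_zipStar_eq (pvKept md gs), htk0, htkl, hmids, pv_pyRange_eq]
        rw [if_pos (show ¬ c = 0 from hc0),
          if_pos (show ¬ c = 0 ∧ 1 ≤ c ∧ c ≤ (pvMinLen (pvKept md gs) : Int) - 2 from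
            ⟨hc0, hcr.1, hcr.2⟩)]
        rw [← hcc] at hc0 ⊢
        dsimp only [Option.getD_some]
        simp only [hcol, huq]
        simp only [ne_eq, not_true_eq_false, decide_false, Bool.false_eq_true, if_false]
        rw [pv_core_ren mh irc (pvKept md gs) (pvMinLen (pvKept md gs)) c.toNat hb1 hb2 huq]
        exact pv_finish mh (pvKept md gs) (pvMinLen (pvKept md gs)) hm1 _
      · -- rename id given but out of range: the loop never hits it
        simp only [filter_mapping_file, filter_mapping_file_alt, hfA, hfB, hnm,
          pv_zipStar_eq (pvKept md gs), htk0, htkl, hmids, pv_pyRange_eq]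
        rw [if_pos (show ¬ c = 0 from hc0),
          if_neg (show ¬ (¬ c = 0 ∧ 1 ≤ c ∧ c ≤ (pvMinLen (pvKept md gs) : Int) - 2) from
            fun hcon => hcr ⟨hcon.2.1, hcon.2.2⟩)]
        have hmemA : ∀ p ∈ PySem.List.enumerate
            ((List.range' 1 (pvMinLen (pvKept md gs) - 2)).map (pvColD (pvKept md gs))) 0,
            p.1 ≠ c - 1 := by
          intro p hp
          have hb := pv_enum_mem _ 0 p hp
          simp at hb
          rcases lt_or_ge c 1 with h | h
          · omega
          · have : ¬ (c ≤ (pvMinLen (pvKept md gs) : Int) - 2) := fun hh => hcr ⟨h, hh⟩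
            omega
        rw [pv_aFold_noRen mh irc _ _ hmemA]
        simp only [Bool.false_eq_true, if_false, Option.getD_none]
        exact pv_core_plain mh irc (pvKept md gs) (pvMinLen (pvKept md gs)) hm1
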